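-- pv_equiv track=rewrite | github.com/MuongKimhong/SpaceX-rocket | rocket.py | draw_fire
-- ===== SOURCE A (Python) =====
-- def draw_fire(fire, fm_one, fm_two, fm_three) -> str:
--     center_index = 30
--     point_from_center = 0
--
--     for d in range(15): # down direction
--         fire = fire + "\n"
--
--         for i in range(60):
--             if d <= 8:
--                 point_from_center = 5
--             else:
--                 point_from_center = 15 - d
--
--             if i < center_index - point_from_center or i > center_index + point_from_center:
--                 fire = fire + " "
--             elif d == fm_one or d == fm_two or d == fm_three:
--                 fire = fire + "v"
--             else:
--                 fire = fire + "*"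
--
--     return fire
-- ===== SOURCE B (Python) =====
-- def draw_fire(fire, fm_one, fm_two, fm_three) -> str:
--     rows = []
--     for d in range(15):
--         p = 5 if d <= 8 else 15 - d
--         ch = 'v' if d in (fm_one, fm_two, fm_three) else '*'
--         rows.append('\n' + ' ' * (30 - p) + ch * (2 * p + 1) + ' ' * (29 - p))
--     return fire + ''.join(rows)
-- ===== Notes on version B (the rewrite author's own statement) =====
-- stated objective: simpler
-- what changed: Each 60-column row is built directly by string repetition from a closed-form half-width p (5 for d<=8, else 15-d), removing the inner 60-iteration loop with its per-character branching and the quadratic string re-append.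
import Mathlib
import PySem

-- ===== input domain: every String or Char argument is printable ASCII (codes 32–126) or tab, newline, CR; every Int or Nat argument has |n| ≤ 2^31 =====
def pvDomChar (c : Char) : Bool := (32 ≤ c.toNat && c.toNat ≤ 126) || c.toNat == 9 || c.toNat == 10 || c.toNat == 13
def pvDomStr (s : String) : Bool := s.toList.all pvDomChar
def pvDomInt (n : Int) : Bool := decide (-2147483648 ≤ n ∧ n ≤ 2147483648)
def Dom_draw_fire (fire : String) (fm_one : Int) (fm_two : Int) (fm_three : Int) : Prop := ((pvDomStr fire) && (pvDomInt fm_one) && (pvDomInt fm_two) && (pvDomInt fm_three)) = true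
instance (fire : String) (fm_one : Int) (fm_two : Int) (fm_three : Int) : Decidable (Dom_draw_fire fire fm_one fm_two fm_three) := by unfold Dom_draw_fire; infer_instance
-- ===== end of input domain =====

-- B builds each row directly by character repetition from the closed-form half-width p,
-- replacing A's inner 60-column loop with per-character branching; objective: simpler.

-- ===== PORT A =====
-- literal transliteration of A: outer loop over range(15), inner loop over range(60),
-- appending one character at a time (strings carried as List Char; PySem note: Lean's
-- String.append is kernel-opaque, so appends are exact on code points via toList/mk)
def draw_fire (fire : String) (fm_one : Int) (fm_two : Int) (fm_three : Int) : String :=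
  String.mk <|
    (PySem.List.pyRange 0 15 1).foldl (fun f d =>
      (PySem.List.pyRange 0 60 1).foldl (fun f2 i =>
        let point_from_center : Int := if d ≤ 8 then 5 else 15 - d
        if i < 30 - point_from_center ∨ 30 + point_from_center < i then f2 ++ [' ']
        else if d = fm_one ∨ d = fm_two ∨ d = fm_three then f2 ++ ['v']
        else f2 ++ ['*'])
        (f ++ ['\n']))
      fire.toList

-- ===== PORT B =====
-- transliteration of Source B: build the 15 rows by repetition, join, append to fire
def draw_fire_alt (fire : String) (fm_one : Int) (fm_two : Int) (fm_three : Int) : String :=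
  String.mk <|
    fire.toList ++
      (PySem.List.pyRange 0 15 1).flatMap (fun d =>
        let p : Int := if d ≤ 8 then 5 else 15 - d
        let ch : Char := if d = fm_one ∨ d = fm_two ∨ d = fm_three then 'v' else '*'
        '\n' :: (List.replicate (30 - p).toNat ' ' ++ List.replicate (2 * p + 1).toNat ch
                  ++ List.replicate (29 - p).toNat ' '))

-- ===== PRECONDITION & SPEC =====
def Spec_draw_fire (fire : String) (fm_one : Int) (fm_two : Int) (fm_three : Int) (out : String) : Prop := out = draw_fire_alt fire fm_one fm_two fm_three
instance (fire : String) (fm_one : Int) (fm_two : Int) (fm_three : Int) (out : String) : Decidable (Spec_draw_fire fire fm_one fm_two fm_three out) := by unfold Spec_draw_fire; infer_instance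

-- ===== CLAIM (what is proved, stated in full; the proofs are below) =====
def Claim_equal_draw_fire : Prop := ∀ (fire : String) (fm_one : Int) (fm_two : Int) (fm_three : Int), Dom_draw_fire fire fm_one fm_two fm_three → Spec_draw_fire fire fm_one fm_two fm_three (draw_fire fire fm_one fm_two fm_three)

-- ===== LEMMAS AND PROOFS =====

-- A's inner-loop character, with the fm-membership test abstracted to a Bool
def pvCell (d : Int) (hit : Bool) (i : Int) : List Char :=
  if i < 30 - (if d ≤ 8 then (5:Int) else 15 - d) ∨ 30 + (if d ≤ 8 then (5:Int) else 15 - d) < i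
  then [' '] else if hit then ['v'] else ['*']

-- B's row, with the membership test abstracted to a Bool
def pvRow (d : Int) (hit : Bool) : List Char :=
  let p : Int := if d ≤ 8 then 5 else 15 - d
  List.replicate (30 - p).toNat ' ' ++ List.replicate (2 * p + 1).toNat (if hit then 'v' else '*')
    ++ List.replicate (29 - p).toNat ' '

-- for each of the 15 rows, A's 60 cells concatenate to B's row (closed computation)
set_option maxHeartbeats 2000000 in
theorem pvRows_eq : ∀ d ∈ PySem.List.pyRange 0 15 1, ∀ hit : Bool,
    (PySem.List.pyRange 0 60 1).flatMap (pvCell d hit) = pvRow d hit := by decide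

theorem pv_draw_fire_eq (fire : String) (fm_one fm_two fm_three : Int) :
    draw_fire fire fm_one fm_two fm_three = draw_fire_alt fire fm_one fm_two fm_three := by
  unfold draw_fire draw_fire_alt
  refine congrArg String.mk ?_
  have hcell : ∀ d : Int,
      (fun (f2 : List Char) (i : Int) =>
        let point_from_center : Int := if d ≤ 8 then 5 else 15 - d
        if i < 30 - point_from_center ∨ 30 + point_from_center < i then f2 ++ [' ']
        else if d = fm_one ∨ d = fm_two ∨ d = fm_three then f2 ++ ['v']
        else f2 ++ ['*'])
      = fun f2 i => f2 ++ pvCell d (decide (d = fm_one ∨ d = fm_two ∨ d = fm_three)) i := by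
    intro d; funext f2 i
    by_cases hp : d = fm_one ∨ d = fm_two ∨ d = fm_three <;>
      simp only [pvCell, hp, decide_true, decide_false, if_true, if_false] <;>
      split_ifs <;> simp_all
  have houter :
      (fun (f : List Char) (d : Int) =>
        (PySem.List.pyRange 0 60 1).foldl (fun f2 i =>
          let point_from_center : Int := if d ≤ 8 then 5 else 15 - d
          if i < 30 - point_from_center ∨ 30 + point_from_center < i then f2 ++ [' ']
          else if d = fm_one ∨ d = fm_two ∨ d = fm_three then f2 ++ ['v']
          else f2 ++ ['*'])
          (f ++ ['\n']))
      = fun f d => f ++ ('\n' :: (PySem.List.pyRange 0 60 1).flatMap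
          (pvCell d (decide (d = fm_one ∨ d = fm_two ∨ d = fm_three)))) := by
    funext f d
    rw [hcell d, PySem.List.foldl_append_eq_flatMap, List.append_assoc]
    rfl
  rw [houter, PySem.List.foldl_append_eq_flatMap]
  congr 1
  rw [List.flatMap_def, List.flatMap_def]
  congr 1
  apply List.map_congr_left
  intro d hd
  rw [pvRows_eq d hd]
  by_cases hp : d = fm_one ∨ d = fm_two ∨ d = fm_three <;> simp [pvRow, hp]

-- ===== VERDICT (by name: the statement is the Claim_ definition above) =====
theorem draw_fire_spec : Claim_equal_draw_fire := by
  intro fire fm_one fm_two fm_three _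
  exact pv_draw_fire_eq fire fm_one fm_two fm_three
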